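-- pv_equiv track=rewrite | github.com/JuniorDevNam/Python | Lớp 12/Bài tập/29 - 9/bai2/bai2.py | xu_ly
-- ===== SOURCE A (Python) =====
-- def xu_ly(N,A):
--     chan, le = [], []
--     for i in A:
--         if i % 2 == 0:
--             chan.append(i)
--         else:
--             le.append(i)
--     chan.sort()
--     le.sort()
--     return " ".join(str(x) for x in chan + le)
-- ===== SOURCE B (Python) =====
-- def xu_ly(N, A):
--     # One sort with the composite key (parity, value): evens (x % 2 == 0) come
--     # first, each bucket in increasing order -- no partition pass, no second sort.
--     return " ".join(str(x) for x in sorted(A, key=lambda x: (x % 2, x)))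
-- ===== Notes on version B (the rewrite author's own statement) =====
-- stated objective: simpler
-- what changed: A partitions into two lists and sorts each bucket; B does a single sort of the whole list under the composite key (x % 2, x), which places evens before odds and orders each bucket, so the partition pass and the second sort disappear.
import Mathlib
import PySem

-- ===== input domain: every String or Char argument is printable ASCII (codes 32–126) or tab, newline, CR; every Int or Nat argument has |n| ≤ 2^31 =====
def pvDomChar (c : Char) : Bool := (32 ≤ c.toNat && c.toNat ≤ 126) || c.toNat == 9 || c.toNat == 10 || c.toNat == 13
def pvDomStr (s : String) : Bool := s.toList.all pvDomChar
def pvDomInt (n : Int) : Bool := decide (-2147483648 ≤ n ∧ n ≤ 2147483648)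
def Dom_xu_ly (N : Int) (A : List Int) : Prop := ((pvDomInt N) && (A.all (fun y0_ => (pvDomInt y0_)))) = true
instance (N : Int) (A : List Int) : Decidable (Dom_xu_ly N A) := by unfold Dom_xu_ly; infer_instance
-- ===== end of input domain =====

-- B replaces A's partition loop + two per-bucket sorts by ONE sort of the whole
-- list under the composite key (x % 2, x) (objective: simpler).

-- ===== PORT A =====
def xu_ly (N : Int) (A : List Int) : String :=
  let p := A.foldl
    (fun (st : List Int × List Int) i =>
      if PySem.Int.mod i 2 == 0 then (st.1 ++ [i], st.2) else (st.1, st.2 ++ [i]))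
    ([], [])
  let chan := PySem.List.sorted p.1 (fun x => x) false
  let le := PySem.List.sorted p.2 (fun x => x) false
  PySem.Str.join " " ((chan ++ le).map PySem.Int.toStr)

-- ===== PORT B =====
def xu_ly_alt (N : Int) (A : List Int) : String :=
  PySem.Str.join " "
    ((PySem.List.sorted2 A (fun x => PySem.Int.mod x 2) (fun x => x) false).map PySem.Int.toStr)

-- ===== PRECONDITION & SPEC =====
def Spec_xu_ly (N : Int) (A : List Int) (out : String) : Prop := out = xu_ly_alt N A
instance (N : Int) (A : List Int) (out : String) : Decidable (Spec_xu_ly N A out) := by unfold Spec_xu_ly; infer_instance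

-- ===== CLAIM (what is proved, stated in full; the proofs are below) =====
def Claim_equal_xu_ly : Prop := ∀ (N : Int) (A : List Int), Dom_xu_ly N A → Spec_xu_ly N A (xu_ly N A)

-- ===== LEMMAS AND PROOFS =====

-- Python's x % 2 is Lean's emod for the positive divisor 2.
theorem pv_mod_two (x : Int) : PySem.Int.mod x 2 = x % 2 := by
  show x.fmod 2 = x % 2
  rw [Int.fmod_eq_emod]; simp

theorem pv_parity (x : Int) : PySem.Int.mod x 2 = 0 ∨ PySem.Int.mod x 2 = 1 := by
  rw [pv_mod_two]; omega

-- An integer key realising the lexicographic order on (x % 2, x) for |x| ≤ 2^31: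
-- evens keep their value, odds are shifted above every even by 2^34.
def pvK (x : Int) : Int := if PySem.Int.mod x 2 = 0 then x else 17179869184 + x

theorem pvK_inj : Function.Injective pvK := by
  intro x y h
  unfold pvK at h
  have hx := pv_parity x
  have hy := pv_parity y
  rw [pv_mod_two] at hx hy
  rw [pv_mod_two, pv_mod_two] at h
  split_ifs at h <;> omega

-- A's partition loop yields exactly the two filters of A.
theorem partition_foldl (p : Int → Bool) (A acc1 acc2 : List Int) :
    A.foldl
      (fun (st : List Int × List Int) i =>
        if p i then (st.1 ++ [i], st.2) else (st.1, st.2 ++ [i]))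
      (acc1, acc2)
    = (acc1 ++ A.filter p, acc2 ++ A.filter (fun i => !(p i))) := by
  induction A generalizing acc1 acc2 with
  | nil => simp
  | cons a t ih =>
    by_cases h : p a = true <;> simp [h, ih]

-- insertBy only consults `before` on the inserted element and list members.
theorem insertBy_congr (b1 b2 : Int → Int → Bool) (x : Int) (acc : List Int)
    (h : ∀ a ∈ acc, b1 x a = b2 x a) :
    PySem.List.insertBy b1 x acc = PySem.List.insertBy b2 x acc := by
  induction acc with
  | nil => rfl
  | cons y ys ih =>
    have hy : b1 x y = b2 x y := h y (by simp)
    have ih' := ih (fun a ha => h a (by simp [ha]))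
    simp [PySem.List.insertBy, hy, ih']

-- The whole insertion-sort fold only consults `before` on pairs of elements.
theorem foldl_insertBy_congr (b1 b2 : Int → Int → Bool) (xs acc : List Int)
    (h : ∀ x ∈ xs, ∀ a, (a ∈ acc ∨ a ∈ xs) → b1 x a = b2 x a) :
    xs.foldl (fun acc x => PySem.List.insertBy b1 x acc) acc
      = xs.foldl (fun acc x => PySem.List.insertBy b2 x acc) acc := by
  induction xs generalizing acc with
  | nil => rfl
  | cons x t ih =>
    have h1 : PySem.List.insertBy b1 x acc = PySem.List.insertBy b2 x acc :=
      insertBy_congr b1 b2 x acc (fun a ha => h x (by simp) a (Or.inl ha))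
    simp only [List.foldl_cons, h1]
    exact ih (PySem.List.insertBy b2 x acc)
      (fun y hy a ha => h y (by simp [hy]) a (by
        rcases ha with ha | ha
        · rcases (PySem.List.mem_insertBy b2 x a acc).mp ha with rfl | ha
          · exact Or.inr (by simp)
          · exact Or.inl ha
        · exact Or.inr (by simp [ha])))

-- On bounded integers, sorted2's lexicographic comparison IS the pvK comparison.
theorem lt2_eq_ltK (x a : Int)
    (bx : -2147483648 ≤ x ∧ x ≤ 2147483648) (ba : -2147483648 ≤ a ∧ a ≤ 2147483648) :
    (decide (PySem.Int.mod x 2 < PySem.Int.mod a 2) ||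
      (!decide (PySem.Int.mod a 2 < PySem.Int.mod x 2) && decide (x < a)))
    = decide (pvK x < pvK a) := by
  rcases pv_parity x with hx | hx <;> rcases pv_parity a with ha | ha <;>
    simp only [pvK, hx, ha] <;> norm_num <;> omega

-- Hence B's single composite-key sort is a plain sort by pvK.
theorem sorted2_eq_sortedK (A : List Int)
    (hb : ∀ x ∈ A, -2147483648 ≤ x ∧ x ≤ 2147483648) :
    PySem.List.sorted2 A (fun x => PySem.Int.mod x 2) (fun x => x) false
      = PySem.List.sorted A pvK false := by
  rw [PySem.List.sorted_eq_foldl_insertBy]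
  show A.foldl (fun acc x => PySem.List.insertBy
      (fun a b => decide (PySem.Int.mod a 2 < PySem.Int.mod b 2) ||
        (!decide (PySem.Int.mod b 2 < PySem.Int.mod a 2) && decide (a < b))) x acc) [] = _
  apply foldl_insertBy_congr
  intro x hx a ha
  rcases ha with ha | ha
  · cases ha
  · exact lt2_eq_ltK x a (hb x hx) (hb a ha)

-- A's chan ++ le is a pvK-sorted rearrangement of A, hence equals sorted A pvK.
theorem chan_le_eq_sortedK (A : List Int)
    (hb : ∀ x ∈ A, -2147483648 ≤ x ∧ x ≤ 2147483648) :
    PySem.List.sorted (A.filter (fun i => PySem.Int.mod i 2 == 0)) (fun x => x) false ++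
      PySem.List.sorted (A.filter (fun i => !(PySem.Int.mod i 2 == 0))) (fun x => x) false
    = PySem.List.sorted A pvK false := by
  have memc : ∀ a ∈ PySem.List.sorted (A.filter (fun i => PySem.Int.mod i 2 == 0)) (fun x => x) false,
      a ∈ A ∧ PySem.Int.mod a 2 = 0 := by
    intro a ha
    rw [PySem.List.mem_sorted, List.mem_filter] at ha
    exact ⟨ha.1, by simpa using ha.2⟩
  have meml : ∀ a ∈ PySem.List.sorted (A.filter (fun i => !(PySem.Int.mod i 2 == 0))) (fun x => x) false,
      a ∈ A ∧ PySem.Int.mod a 2 = 1 := by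
    intro a ha
    rw [PySem.List.mem_sorted, List.mem_filter] at ha
    refine ⟨ha.1, ?_⟩
    rcases pv_parity a with h | h
    · exfalso; have hc := ha.2; have h' := h; rw [pv_mod_two] at h'; simp at hc; omega
    · exact h
  apply PySem.List.eq_of_perm_of_pairwise_le_of_injective pvK pvK_inj
  · exact ((PySem.List.sorted_perm _ _ _).append (PySem.List.sorted_perm _ _ _)).trans
      ((List.filter_append_perm _ A).trans (PySem.List.sorted_perm A pvK false).symm)
  · rw [List.pairwise_append]
    refine ⟨?_, ?_, ?_⟩
    · refine (PySem.List.sorted_pairwise _ (fun x => x)).imp_of_mem ?_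
      intro a b ha hb' hab
      have h1 := (memc a ha).2
      have h2 := (memc b hb').2
      simp only [pvK]
      rw [if_pos h1, if_pos h2]
      exact hab
    · refine (PySem.List.sorted_pairwise _ (fun x => x)).imp_of_mem ?_
      intro a b ha hb' hab
      have h1 := (meml a ha).2
      have h2 := (meml b hb').2
      simp only [pvK]
      rw [if_neg (by rw [h1]; norm_num), if_neg (by rw [h2]; norm_num)]
      omega
    · intro a ha b hb'
      have h1 := memc a ha
      have h2 := meml b hb'
      have b1 := hb a h1.1
      have b2 := hb b h2.1
      simp only [pvK, h1.2, h2.2]; norm_num; omega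
  · exact PySem.List.sorted_pairwise A pvK

-- ===== VERDICT (by name: the statement is the Claim_ definition above) =====
theorem xu_ly_spec : Claim_equal_xu_ly := by
  intro N A hD
  show xu_ly N A = xu_ly_alt N A
  have hb : ∀ x ∈ A, -2147483648 ≤ x ∧ x ≤ 2147483648 := by
    intro x hx
    unfold Dom_xu_ly at hD
    rw [Bool.and_eq_true, List.all_eq_true] at hD
    have := hD.2 x hx
    simpa [pvDomInt] using this
  simp only [xu_ly, xu_ly_alt, partition_foldl, List.nil_append,
    sorted2_eq_sortedK A hb, chan_le_eq_sortedK A hb]
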